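-- pv_equiv track=rewrite | github.com/douglaskastle/ptptime | ptptime/ptptime.py | bcdTointConvert
-- ===== SOURCE A (Python) =====
-- def bcdTointConvert(a):
-- 	b = 0
-- 	i = 0
-- 	while not 0 == a:
-- 		b += (a & 0xf) * (10**i)
-- 		a = a >> 4
-- 		i += 1
-- 	return b
-- ===== SOURCE B (Python) =====
-- def bcdTointConvert(a):
--     # pass 1: peel nibbles, least significant first
--     nibbles = []
--     while a != 0:
--         nibbles.append(a & 0xF)
--         a >>= 4
--     # pass 2: Horner's rule from most significant nibble
--     result = 0
--     for nib in reversed(nibbles):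
--         result = result * 10 + nib
--     return result
-- ===== Notes on version B (the rewrite author's own statement) =====
-- stated objective: alternative
-- what changed: Replaces the single loop accumulating nibble*10**i positional weights with a two-pass scheme: first collect the nibble list, then fold it most-significant-first with Horner's rule (result*10+nib), eliminating the power computation.
import Mathlib
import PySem

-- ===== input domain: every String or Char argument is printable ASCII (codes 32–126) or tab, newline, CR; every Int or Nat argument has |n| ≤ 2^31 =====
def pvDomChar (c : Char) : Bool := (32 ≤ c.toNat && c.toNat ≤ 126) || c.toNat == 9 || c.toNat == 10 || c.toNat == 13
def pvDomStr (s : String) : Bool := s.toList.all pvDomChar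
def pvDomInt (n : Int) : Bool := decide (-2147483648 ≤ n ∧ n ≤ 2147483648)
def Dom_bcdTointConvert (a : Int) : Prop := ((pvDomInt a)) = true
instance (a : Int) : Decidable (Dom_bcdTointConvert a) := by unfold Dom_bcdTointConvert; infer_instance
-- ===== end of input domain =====

-- B replaces the positional-weight sum (nibble * 10**i) with a two-pass scheme: peel the
-- nibble list, then Horner-fold it most-significant-first (objective: alternative).
-- Both Pythons diverge on negative input (a >>= 4 never reaches 0), so only 0 ≤ a is
-- behaviourally observable; there every step is exact Nat arithmetic (a & 0xf = a % 16,
-- a >> 4 = a / 16), so the ports run over Nat via a.toNat and agree on all of Int.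

-- ===== PORT A =====
-- A's while-loop: b += (a & 0xf) * 10**i; a >>= 4; i += 1
def bcdLoopA (n : Nat) (b : Nat) (i : Nat) : Nat :=
  if h : n = 0 then b
  else bcdLoopA (n / 16) (b + (n % 16) * 10 ^ i) (i + 1)
decreasing_by exact Nat.div_lt_self (Nat.pos_of_ne_zero h) (by norm_num)

def bcdTointConvert (a : Int) : Int := (bcdLoopA a.toNat 0 0 : Nat)

-- ===== PORT B =====
-- pass 1 of Source B: nibble list, least significant first
def bcdNibbles (n : Nat) : List Nat :=
  if h : n = 0 then []
  else (n % 16) :: bcdNibbles (n / 16)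
decreasing_by exact Nat.div_lt_self (Nat.pos_of_ne_zero h) (by norm_num)

-- pass 2 of Source B: Horner fold over reversed(nibbles)
def bcdTointConvert_alt (a : Int) : Int :=
  ((bcdNibbles a.toNat).reverse.foldl (fun r nib => r * 10 + nib) 0 : Nat)

-- ===== PRECONDITION & SPEC =====
def Spec_bcdTointConvert (a : Int) (out : Int) : Prop := out = bcdTointConvert_alt a
instance (a : Int) (out : Int) : Decidable (Spec_bcdTointConvert a out) := by unfold Spec_bcdTointConvert; infer_instance

-- ===== CLAIM (what is proved, stated in full; the proofs are below) =====
def Claim_equal_bcdTointConvert : Prop := ∀ (a : Int), Dom_bcdTointConvert a → Spec_bcdTointConvert a (bcdTointConvert a)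

-- ===== LEMMAS AND PROOFS =====
-- B's value on n, as one definition for the induction
def bcdHorner (n : Nat) : Nat := (bcdNibbles n).reverse.foldl (fun r nib => r * 10 + nib) 0

lemma bcdHorner_step (n : Nat) (h : n ≠ 0) : bcdHorner n = bcdHorner (n / 16) * 10 + n % 16 := by
  unfold bcdHorner
  rw [bcdNibbles, dif_neg h]
  simp [List.foldl_append]

lemma bcdLoopA_eq (n : Nat) : ∀ b i, bcdLoopA n b i = b + 10 ^ i * bcdHorner n := by
  induction n using Nat.strong_induction_on with
  | _ n ih =>
    intro b i
    by_cases h : n = 0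
    · subst h
      rw [bcdLoopA]
      simp [bcdHorner, bcdNibbles]
    · rw [bcdLoopA, dif_neg h,
        ih (n / 16) (Nat.div_lt_self (Nat.pos_of_ne_zero h) (by norm_num)),
        bcdHorner_step n h]
      ring

-- ===== VERDICT (by name: the statement is the Claim_ definition above) =====
theorem bcdTointConvert_spec : Claim_equal_bcdTointConvert := by
  intro a _
  show bcdTointConvert a = bcdTointConvert_alt a
  unfold bcdTointConvert bcdTointConvert_alt
  rw [bcdLoopA_eq]
  simp [bcdHorner]
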